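-- pv_equiv track=rewrite | github.com/pypi-data/pypi-mirror-391 | packages/multi-puzzle-solver/multi_puzzle_solver-1.1.6-py3-none-any.whl/puzzle_solver/puzzles/tapa/tapa.py | rotated_assignments_N_nums
-- ===== SOURCE A (Python) =====
-- from itertools import combinations
--
-- def rotated_assignments_N_nums(Xs: tuple[int, ...], target_length: int = 8) -> set[tuple[bool, ...]]:
--     """ Given Xs = [X1, X2, ..., Xm] (each Xi >= 1), build all unique length-`target_length`
--         boolean lists of the form: [ True*X1, False*N1, True*X2, False*N2, ..., True*Xm, False*Nm ]
--         where each Ni >= 1 and sum(Xs) + sum(Ni) = target_length,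
--         including all `target_length` wrap-around rotations, de-duplicated.
--     """
--     assert len(Xs) >= 1 and all(x >= 1 for x in Xs), "Xs must have at least one block length and all Xi must be >= 1."
--     assert sum(Xs) + len(Xs) <= target_length, f"sum(Xs) + len(Xs) <= target_length required; got {sum(Xs)} + {len(Xs)} > {target_length}"
--     num_zero_blocks = len(Xs)
--     total_zeros = target_length - sum(Xs)
--     seen: set[tuple[bool, ...]] = set()
--     for cut_positions in combinations(range(1, total_zeros), num_zero_blocks - 1):
--         cut_positions = (*cut_positions, total_zeros)
--         Ns = [cut_positions[0]]  # length of zero blocks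
--         for i in range(1, len(cut_positions)):
--             Ns.append(cut_positions[i] - cut_positions[i - 1])
--         base: list[bool] = []
--         for x, n in zip(Xs, Ns):
--             base.extend([True] * x)
--             base.extend([False] * n)
--         for dx in range(target_length):  # all rotations (wrap-around)
--             rot = tuple(base[dx:] + base[:dx])
--             seen.add(rot)
--     return seen
-- ===== SOURCE B (Python) =====
-- def _compositions(total, k):
--     """All tuples of k positive ints summing to total, first part ascending."""
--     if k == 1:
--         return [(total,)] if total >= 1 else []
--     out = []
--     for first in range(1, total - k + 2):
--         for rest in _compositions(total - first, k - 1):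
--             out.append((first,) + rest)
--     return out
--
-- def rotated_assignments_N_nums(Xs, target_length=8):
--     assert len(Xs) >= 1 and all(x >= 1 for x in Xs), "Xs must have at least one block length and all Xi must be >= 1."
--     assert sum(Xs) + len(Xs) <= target_length, f"sum(Xs) + len(Xs) <= target_length required; got {sum(Xs)} + {len(Xs)} > {target_length}"
--     total_zeros = target_length - sum(Xs)
--     seen = set()
--     for Ns in _compositions(total_zeros, len(Xs)):
--         base = [v for x, n in zip(Xs, Ns) for v in [True] * x + [False] * n]
--         for dx in range(target_length):
--             seen.add(tuple(base[dx:] + base[:dx]))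
--     return seen
-- ===== Notes on version B (the rewrite author's own statement) =====
-- stated objective: alternative
-- what changed: Replaces the itertools.combinations-over-cut-positions (stars-and-bars) enumeration plus the index-difference loop by a direct recursive generator of compositions of total_zeros into len(Xs) positive parts; base rows are built by a flattening comprehension instead of an extend loop.
import Mathlib
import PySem

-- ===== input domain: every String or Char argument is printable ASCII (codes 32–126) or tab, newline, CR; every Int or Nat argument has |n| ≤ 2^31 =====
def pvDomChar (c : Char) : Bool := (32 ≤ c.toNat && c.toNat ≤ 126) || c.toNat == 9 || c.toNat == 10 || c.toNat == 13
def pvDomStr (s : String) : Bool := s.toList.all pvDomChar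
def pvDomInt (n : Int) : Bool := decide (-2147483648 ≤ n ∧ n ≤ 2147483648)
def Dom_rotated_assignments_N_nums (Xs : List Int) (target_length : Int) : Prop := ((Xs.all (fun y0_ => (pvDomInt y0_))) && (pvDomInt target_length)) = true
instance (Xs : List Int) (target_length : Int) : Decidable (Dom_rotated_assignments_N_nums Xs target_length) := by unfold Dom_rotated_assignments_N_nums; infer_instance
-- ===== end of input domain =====

-- B replaces A's combinations-over-cut-positions (stars and bars) enumeration by a direct
-- recursive generator of compositions of total_zeros into positive parts (objective: alternative,
-- same asymptotic cost).

-- ===== PORT A =====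
-- itertools.combinations(xs, r): r-subsequences in lexicographic order (standard recursion)
def pvCombinations {α : Type} : List α → Nat → List (List α)
  | _, 0 => [[]]
  | [], _ + 1 => []
  | x :: xs, k + 1 => ((pvCombinations xs k).map (fun c => x :: c)) ++ pvCombinations xs (k + 1)

-- the loop 'for i in range(1, len(cp)): Ns.append(cp[i] - cp[i-1])' as structural recursion
def pvDiffLoop : Int → List Int → List Int
  | _, [] => []
  | prev, c :: cs => (c - prev) :: pvDiffLoop c cs

-- 'Ns = [cp[0]]' followed by the diff loop (cp is never empty in A)
def pvNsOfCp : List Int → List Int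
  | [] => []
  | c0 :: rest => c0 :: pvDiffLoop c0 rest

def rotated_assignments_N_nums (Xs : List Int) (target_length : Int) : List (List Bool) :=
  let num_zero_blocks := Xs.length
  let total_zeros := target_length - Xs.sum
  (pvCombinations (PySem.List.pyRange 1 total_zeros 1) (num_zero_blocks - 1)).foldl
    (fun seen cuts =>
      let cp := cuts ++ [total_zeros]
      let Ns := pvNsOfCp cp
      let base := (Xs.zip Ns).foldl
        (fun b xn => b ++ List.replicate xn.1.toNat true ++ List.replicate xn.2.toNat false) []
      (PySem.List.pyRange 0 target_length 1).foldl
        (fun s dx => PySem.Set.add s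
          (PySem.List.slice base (some dx) none ++ PySem.List.slice base none (some dx))) seen)
    PySem.Set.empty

-- ===== PORT B =====
-- _compositions(total, k): all k-lists of positive ints summing to total, first part ascending
def pvCompositions : Int → Nat → List (List Int)
  | total, 1 => if total ≥ 1 then [[total]] else []
  | total, k + 2 =>
      (PySem.List.pyRange 1 (total - ((k : Int) + 2) + 2) 1).flatMap
        (fun first => (pvCompositions (total - first) (k + 1)).map (fun rest => first :: rest))
  | _, 0 => []  -- unreachable from the entry point (len(Xs) >= 1)

def rotated_assignments_N_nums_alt (Xs : List Int) (target_length : Int) : List (List Bool) :=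
  let total_zeros := target_length - Xs.sum
  (pvCompositions total_zeros Xs.length).foldl
    (fun seen Ns =>
      let base := (Xs.zip Ns).flatMap
        (fun xn => List.replicate xn.1.toNat true ++ List.replicate xn.2.toNat false)
      (PySem.List.pyRange 0 target_length 1).foldl
        (fun s dx => PySem.Set.add s
          (PySem.List.slice base (some dx) none ++ PySem.List.slice base none (some dx))) seen)
    PySem.Set.empty

-- ===== PRECONDITION & SPEC =====
-- Pre_ excludes exactly the inputs on which A's two asserts raise AssertionError.
def Pre_rotated_assignments_N_nums (Xs : List Int) (target_length : Int) : Prop :=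
  Xs ≠ [] ∧ (∀ x ∈ Xs, 1 ≤ x) ∧ Xs.sum + Xs.length ≤ target_length
instance (Xs : List Int) (target_length : Int) : Decidable (Pre_rotated_assignments_N_nums Xs target_length) := by unfold Pre_rotated_assignments_N_nums; infer_instance

def pvWitness_rotated_assignments_N_nums : List Int × Int := ([1, 2], 6)

def Spec_rotated_assignments_N_nums (Xs : List Int) (target_length : Int) (out : List (List Bool)) : Prop := out = rotated_assignments_N_nums_alt Xs target_length
instance (Xs : List Int) (target_length : Int) (out : List (List Bool)) : Decidable (Spec_rotated_assignments_N_nums Xs target_length out) := by unfold Spec_rotated_assignments_N_nums; infer_instance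

-- ===== CLAIM (what is proved, stated in full; the proofs are below) =====
def Claim_equal_rotated_assignments_N_nums : Prop := ∀ (Xs : List Int) (target_length : Int), Dom_rotated_assignments_N_nums Xs target_length → Pre_rotated_assignments_N_nums Xs target_length → Spec_rotated_assignments_N_nums Xs target_length (rotated_assignments_N_nums Xs target_length)

-- ===== LEMMAS AND PROOFS =====

-- Ns as a function of the cut list: successive differences from p, closed with t
def pvNsOf (p t : Int) : List Int → List Int
  | [] => [t - p]
  | c :: cs => (c - p) :: pvNsOf c t cs

theorem pvDiffLoop_append (t : Int) : ∀ (cs : List Int) (p : Int), pvDiffLoop p (cs ++ [t]) = pvNsOf p t cs := by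
  intro cs
  induction cs with
  | nil => intro p; simp [pvDiffLoop, pvNsOf]
  | cons c cs ih => intro p; simp [pvDiffLoop, pvNsOf, ih]

theorem pvNsOfCp_eq (t : Int) (cuts : List Int) : pvNsOfCp (cuts ++ [t]) = pvNsOf 0 t cuts := by
  cases cuts with
  | nil => simp [pvNsOfCp, pvDiffLoop, pvNsOf]
  | cons c cs => simp [pvNsOfCp, pvNsOf, pvDiffLoop_append]

theorem pvCompositions_eq_nil (total : Int) (k : Nat) (h : total < (k : Int)) : pvCompositions total k = [] := by
  match k with
  | 0 => rfl
  | 1 => simp only [pvCompositions]; rw [if_neg (by omega)]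
  | k + 2 =>
      simp only [pvCompositions]
      rw [PySem.List.pyRange_one_eq_nil (by push_cast at h ⊢; omega)]
      rfl

theorem pvCombinations_pyRange (b : Int) (k : Nat) : ∀ (n : Nat) (a : Int), b - a ≤ (n : Int) →
    pvCombinations (PySem.List.pyRange a b 1) (k + 1)
      = (PySem.List.pyRange a b 1).flatMap
          (fun c => (pvCombinations (PySem.List.pyRange (c + 1) b 1) k).map (fun l => c :: l)) := by
  intro n
  induction n with
  | zero =>
      intro a h
      rw [PySem.List.pyRange_one_eq_nil (by omega)]
      rfl
  | succ n ih =>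
      intro a h
      by_cases hab : a < b
      · rw [PySem.List.pyRange_one_cons hab]
        simp only [pvCombinations, List.flatMap_cons]
        rw [ih (a + 1) (by push_cast at h ⊢; omega)]
      · rw [PySem.List.pyRange_one_eq_nil (by omega)]
        rfl

theorem pvRange_shift (p : Int) (a b : Int) :
    PySem.List.pyRange (a + p) (b + p) 1 = (PySem.List.pyRange a b 1).map (fun x => x + p) := by
  rw [PySem.List.pyRange_one, PySem.List.pyRange_one]
  have : b + p - (a + p) = b - a := by ring
  rw [this, List.map_map]
  apply List.map_congr_left
  intro x _
  simp; ring

theorem pvMain (t : Int) : ∀ (k : Nat) (p : Int), p < t →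
    (pvCombinations (PySem.List.pyRange (p + 1) t 1) k).map (pvNsOf p t)
      = pvCompositions (t - p) (k + 1) := by
  intro k
  induction k with
  | zero =>
      intro p hp
      simp only [pvCombinations, List.map_cons, List.map_nil, pvNsOf, pvCompositions]
      rw [if_pos (by omega)]
  | succ k ih =>
      intro p hp
      rw [pvCombinations_pyRange t k (t - p).toNat (p + 1) (by omega)]
      rw [List.map_flatMap]
      -- pointwise rewrite inside the flatMap using the IH (c < t for every member)
      have hcong : ∀ c ∈ PySem.List.pyRange (p + 1) t 1,
          ((pvCombinations (PySem.List.pyRange (c + 1) t 1) k).map (fun l => c :: l)).map (pvNsOf p t)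
            = (pvCompositions (t - c) (k + 1)).map (fun l => (c - p) :: l) := by
        intro c hc
        rw [PySem.List.mem_pyRange_one] at hc
        rw [List.map_map, ← ih c hc.2, List.map_map]
        rfl
      rw [List.flatMap_congr hcong]
      -- reindex c = f + p
      have hrng : PySem.List.pyRange (p + 1) t 1 = (PySem.List.pyRange 1 (t - p) 1).map (fun x => x + p) := by
        have := pvRange_shift p 1 (t - p)
        simpa [add_comm, sub_add_cancel] using this
      rw [hrng, List.flatMap_map]
      have hfun : ∀ f ∈ PySem.List.pyRange 1 (t - p) 1,
          (pvCompositions (t - (f + p)) (k + 1)).map (fun l => (f + p - p) :: l)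
            = (pvCompositions (t - p - f) (k + 1)).map (fun l => f :: l) := by
        intro f _
        have h1 : t - (f + p) = t - p - f := by ring
        have h2 : f + p - p = f := by ring
        rw [h1, h2]
      rw [List.flatMap_congr hfun]
      -- compare the range [1, t-p) with the range [1, t-p-k) of pvCompositions (t-p) (k+2)
      show _ = pvCompositions (t - p) (k + 2)
      simp only [pvCompositions]
      have hk : t - p - ((k : Int) + 2) + 2 = t - p - k := by ring
      rw [hk]
      by_cases hbig : 1 ≤ t - p - (k : Int)
      · rw [PySem.List.pyRange_one_append 1 (t - p - k) (t - p) hbig (by omega), List.flatMap_append]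
        have htail : (PySem.List.pyRange (t - p - k) (t - p) 1).flatMap
            (fun f => (pvCompositions (t - p - f) (k + 1)).map (fun l => f :: l)) = [] := by
          rw [List.flatMap_eq_nil_iff]
          intro f hf
          rw [PySem.List.mem_pyRange_one] at hf
          rw [pvCompositions_eq_nil (t - p - f) (k + 1) (by push_cast; omega)]
          rfl
        rw [htail, List.append_nil]
      · have h0 : PySem.List.pyRange 1 (t - p - (k : Int)) 1 = [] :=
          PySem.List.pyRange_one_eq_nil (by omega)
        rw [h0, List.flatMap_nil, List.flatMap_eq_nil_iff]
        intro f hf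
        rw [PySem.List.mem_pyRange_one] at hf
        rw [pvCompositions_eq_nil (t - p - f) (k + 1) (by push_cast; omega)]
        rfl

-- ===== VERDICT (by name: the statement is the Claim_ definition above) =====
theorem rotated_assignments_N_nums_spec : Claim_equal_rotated_assignments_N_nums := by
  intro Xs target_length _dom hpre
  obtain ⟨hne, hpos, hsum⟩ := hpre
  unfold Spec_rotated_assignments_N_nums rotated_assignments_N_nums rotated_assignments_N_nums_alt
  simp only []
  set t := target_length - Xs.sum with ht
  -- Xs.length = m + 1
  obtain ⟨m, hm⟩ : ∃ m, Xs.length = m + 1 := by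
    cases Xs with
    | nil => exact absurd rfl hne
    | cons x xs => exact ⟨xs.length, by simp⟩
  have hlen : (1 : Int) ≤ (Xs.length : Int) := by rw [hm]; push_cast; omega
  have ht1 : 0 < t := by omega
  have hm1 : Xs.length - 1 = m := by omega
  rw [hm1, hm]
  have hmain := pvMain t m 0 ht1
  simp only [zero_add, sub_zero] at hmain
  rw [← hmain, List.foldl_map]
  apply PySem.List.foldl_congr_mem
  intro acc cuts _
  rw [pvNsOfCp_eq]
  have hbase : (Xs.zip (pvNsOf 0 t cuts)).foldl
      (fun b xn => b ++ List.replicate xn.1.toNat true ++ List.replicate xn.2.toNat false) []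
      = (Xs.zip (pvNsOf 0 t cuts)).flatMap
          (fun xn => List.replicate xn.1.toNat true ++ List.replicate xn.2.toNat false) := by
    simp only [List.append_assoc]
    rw [PySem.List.foldl_append_eq_flatMap]
    simp
  rw [hbase]
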